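-- pv_equiv track=rewrite | github.com/Patxi91/CodeWars_Cloud | 6kyu-How Much-Patxi.py | howmuch
-- ===== SOURCE A (Python) =====
-- def howmuch(m, n):
--     cars = 9
--     boats = 7
--     answer = []
--     for money in range(min(m, n), max(m, n) + 1):
--         if money % boats == 2 and money % cars == 1 :
--             answer.append(["M: {}".format(money),
--                            "B: {}".format(money // boats),
--                            "C: {}".format(money // cars)])
--     return answer
-- ===== SOURCE B (Python) =====
-- def howmuch(m, n):
--     lo, hi = min(m, n), max(m, n)
--     start = lo + (37 - lo) % 63  # 37 is the unique residue mod 63 with x%7==2 and x%9==1 (CRT)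
--     return [["M: {}".format(x), "B: {}".format(x // 7), "C: {}".format(x // 9)]
--             for x in range(start, hi + 1, 63)]
-- ===== Notes on version B (the rewrite author's own statement) =====
-- stated objective: faster
-- what changed: Replaces the per-integer scan testing money%7==2 and money%9==1 by a CRT closed form: the first qualifying value is lo + (37 - lo) % 63, and the rest are enumerated by stepping 63.
import Mathlib
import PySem

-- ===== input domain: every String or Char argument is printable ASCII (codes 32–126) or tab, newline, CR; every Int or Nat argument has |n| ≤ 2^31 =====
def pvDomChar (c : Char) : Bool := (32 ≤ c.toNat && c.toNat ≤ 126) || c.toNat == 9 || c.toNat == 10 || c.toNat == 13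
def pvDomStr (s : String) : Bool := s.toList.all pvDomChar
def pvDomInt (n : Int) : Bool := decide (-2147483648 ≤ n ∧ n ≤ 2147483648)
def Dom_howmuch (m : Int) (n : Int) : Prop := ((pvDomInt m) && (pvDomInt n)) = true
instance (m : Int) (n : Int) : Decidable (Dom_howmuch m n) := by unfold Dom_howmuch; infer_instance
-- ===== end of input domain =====

-- B replaces A's per-integer scan by the CRT closed form (first solution lo + (37 - lo) % 63, then step 63): faster by a constant factor (~63×).

-- ===== PORT A =====
def howmuch (m : Int) (n : Int) : List (List String) :=
  -- cars = 9, boats = 7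
  (PySem.List.pyRange (min m n) (max m n + 1) 1).foldl
    (fun answer money =>
      if PySem.Int.mod money 7 == 2 && PySem.Int.mod money 9 == 1 then
        answer ++ [["M: " ++ PySem.Int.toStr money,
                    "B: " ++ PySem.Int.toStr (PySem.Int.floordiv money 7),
                    "C: " ++ PySem.Int.toStr (PySem.Int.floordiv money 9)]]
      else answer) []

-- ===== PORT B =====
def howmuch_alt (m : Int) (n : Int) : List (List String) :=
  let lo := min m n
  let hi := max m n
  let start := lo + PySem.Int.mod (37 - lo) 63
  (PySem.List.pyRange start (hi + 1) 63).map (fun x =>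
    ["M: " ++ PySem.Int.toStr x,
     "B: " ++ PySem.Int.toStr (PySem.Int.floordiv x 7),
     "C: " ++ PySem.Int.toStr (PySem.Int.floordiv x 9)])

-- ===== PRECONDITION & SPEC =====
def Spec_howmuch (m : Int) (n : Int) (out : List (List String)) : Prop := out = howmuch_alt m n
instance (m : Int) (n : Int) (out : List (List String)) : Decidable (Spec_howmuch m n out) := by unfold Spec_howmuch; infer_instance

-- ===== CLAIM (what is proved, stated in full; the proofs are below) =====
def Claim_equal_howmuch : Prop := ∀ (m : Int) (n : Int), Dom_howmuch m n → Spec_howmuch m n (howmuch m n)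

-- ===== LEMMAS AND PROOFS =====

-- the membership test A performs, as a predicate, and the row both programs build
def pvCond (x : Int) : Bool := PySem.Int.mod x 7 == 2 && PySem.Int.mod x 9 == 1

def pvEntry (x : Int) : List String :=
  ["M: " ++ PySem.Int.toStr x,
   "B: " ++ PySem.Int.toStr (PySem.Int.floordiv x 7),
   "C: " ++ PySem.Int.toStr (PySem.Int.floordiv x 9)]

theorem pvCond_iff (x : Int) : pvCond x = true ↔ x % 63 = 37 := by
  simp only [pvCond, Bool.and_eq_true, beq_iff_eq,
    PySem.Int.mod_eq_emod_of_pos (show (0:Int) < 7 by norm_num),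
    PySem.Int.mod_eq_emod_of_pos (show (0:Int) < 9 by norm_num)]
  omega

-- step-63 range is strictly increasing
theorem pyRange63_pairwise (a b : Int) : (PySem.List.pyRange a b 63).Pairwise (· < ·) := by
  rw [PySem.List.pyRange_of_pos a b (by norm_num)]
  refine List.Pairwise.map _ (fun i j (h : i < j) => ?_) List.pairwise_lt_range
  have : (i : Int) < (j : Int) := by exact_mod_cast h
  omega

-- core: A's filtered unit-step range IS B's stepped range
theorem filter_range_eq (lo b : Int) :
    (PySem.List.pyRange lo b 1).filter pvCond =
      PySem.List.pyRange (lo + PySem.Int.mod (37 - lo) 63) b 63 := by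
  have hmod : PySem.Int.mod (37 - lo) 63 = (37 - lo) % 63 :=
    PySem.Int.mod_eq_emod_of_pos (by norm_num)
  have hleft : ((PySem.List.pyRange lo b 1).filter pvCond).Pairwise (· < ·) :=
    (PySem.List.pairwise_lt_pyRange_one lo b).sublist List.filter_sublist
  have hright := pyRange63_pairwise (lo + PySem.Int.mod (37 - lo) 63) b
  refine List.Perm.eq_of_pairwise (fun a b _ _ h1 h2 => absurd h2 (lt_asymm h1)) hleft hright ?_
  rw [List.perm_ext_iff_of_nodup hleft.nodup hright.nodup]
  intro x
  simp only [List.mem_filter, PySem.List.mem_pyRange_one,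
    PySem.List.mem_pyRange_iff_of_pos (show (0:Int) < 63 by norm_num), pvCond_iff, hmod]
  constructor
  · rintro ⟨⟨h1, h2⟩, h3⟩
    refine ⟨by omega, h2, ?_⟩
    have : (63 : Int) ∣ x - (lo + (37 - lo) % 63) := by omega
    exact this
  · rintro ⟨h1, h2, h3⟩
    obtain ⟨k, hk⟩ := h3
    exact ⟨⟨by omega, h2⟩, by omega⟩

-- ===== VERDICT (by name: the statement is the Claim_ definition above) =====
theorem howmuch_spec : Claim_equal_howmuch := by
  intro m n _
  show howmuch m n = howmuch_alt m n
  unfold howmuch howmuch_alt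
  show List.foldl
      (fun answer money => if pvCond money = true then answer ++ [pvEntry money] else answer)
      [] (PySem.List.pyRange (min m n) (max m n + 1) 1) =
    List.map pvEntry
      (PySem.List.pyRange (min m n + PySem.Int.mod (37 - min m n) 63) (max m n + 1) 63)
  rw [PySem.List.foldl_append_if pvCond pvEntry, filter_range_eq]
  simp
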